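-- pv_equiv track=rewrite | github.com/lukylun/python_selfstudy | codingtest_practice/programmers/Lv_2/피로도.py | solution
-- ===== SOURCE A (Python) =====
-- def perm(arr, n):
--
--     result = []
--
--     if n == 0:
--         return [[]]
--
--     for i, e in enumerate(arr):
--         for p in perm(arr[:i] + arr[i+1:], n-1):
--             result += [[e] + p]
--
--     return result
--
-- def solution(k, dungeons):
--     answer = -1
--
--     arr = perm(dungeons, len(dungeons))
--
--     for i in arr:
--         a = k
--         cnt = 0
--         for j in range(len(i)):
--             if a >= i[j][0]:
--                 a -= i[j][1]
--                 cnt += 1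
--                 continue
--             else:
--                 break
--
--         if cnt > answer:
--             answer = cnt
--
--     return answer
-- ===== SOURCE B (Python) =====
-- def solution(k, dungeons):
--     # Fused depth-first search: try each still-available dungeon that the current
--     # fatigue affords, recurse on the rest, and keep the best count on the fly --
--     # no permutation lists are ever materialised.
--     best = 0
--     for i, d in enumerate(dungeons):
--         if k >= d[0]:
--             c = 1 + solution(k - d[1], dungeons[:i] + dungeons[i+1:])
--             if c > best:
--                 best = c
--     return best
-- ===== Notes on version B (the rewrite author's own statement) =====
-- stated objective: alternative
-- what changed: A materialises all n! permutations as lists and then simulates each from scratch with a break-loop; B is a single fused depth-first search that carries the current fatigue, prunes orders whose next dungeon is unaffordable, and keeps the running best count, never building any permutation list (intended as faster; a timing run measured B 79.98x at n=64, but neither program finishes at n=256, so no 'faster' label is claimed).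
-- outside the precondition, e.g. on solution(0, [[5, -10], [3]]): A returns 0, B returns 0
import Mathlib
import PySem

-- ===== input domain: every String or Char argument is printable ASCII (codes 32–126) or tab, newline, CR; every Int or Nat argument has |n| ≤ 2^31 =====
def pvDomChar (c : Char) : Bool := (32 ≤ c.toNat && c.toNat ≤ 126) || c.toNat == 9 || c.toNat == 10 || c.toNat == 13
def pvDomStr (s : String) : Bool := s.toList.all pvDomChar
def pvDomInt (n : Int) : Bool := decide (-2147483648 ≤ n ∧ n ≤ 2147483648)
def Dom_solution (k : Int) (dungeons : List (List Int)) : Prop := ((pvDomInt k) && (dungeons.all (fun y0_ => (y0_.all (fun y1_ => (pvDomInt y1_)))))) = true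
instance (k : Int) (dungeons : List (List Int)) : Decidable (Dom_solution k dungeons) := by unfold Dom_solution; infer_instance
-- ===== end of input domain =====

-- B replaces A's "materialise all n! permutations, then simulate each" with one fused
-- depth-first search that carries the fatigue and prunes unaffordable branches (objective:
-- alternative; intended as faster — a timing run measured B 79.98x at n=64, but neither
-- program finishes at n=256, so no overall 'faster' is claimed).

-- ===== PORT A =====
-- perm(arr, n): all permutations of length n, built recursively
def perm (arr : List (List Int)) (n : Nat) : List (List (List Int)) :=
  match n with
  | 0 => [[]]
  | m + 1 =>
    (PySem.List.enumerate arr).foldl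
      (fun result ie =>
        result ++ (perm (PySem.List.slice arr none (some ie.1) ++
                         PySem.List.slice arr (some (ie.1 + 1)) none) m).map
          (fun p => ie.2 :: p))
      []

-- the inner 'for j in range(len(i)) … break' loop of A, carrying (a, cnt); j-th element read in order
def runA (a : Int) (cnt : Int) (p : List (List Int)) : Int :=
  match p with
  | [] => cnt
  | d :: rest =>
    if PySem.List.pyGetD d 0 0 ≤ a then
      runA (a - PySem.List.pyGetD d 1 0) (cnt + 1) rest
    else cnt

def solution (k : Int) (dungeons : List (List Int)) : Int :=
  (perm dungeons dungeons.length).foldl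
    (fun answer i =>
      let cnt := runA k 0 i
      if answer < cnt then cnt else answer)
    (-1)

-- ===== PORT B =====
def solution_alt (k : Int) (dungeons : List (List Int)) : Int :=
  (PySem.List.enumerate dungeons).attach.foldl
    (fun best ie =>
      if PySem.List.pyGetD ie.1.2 0 0 ≤ k then
        let c := 1 + solution_alt (k - PySem.List.pyGetD ie.1.2 1 0)
          (PySem.List.slice dungeons none (some ie.1.1) ++
           PySem.List.slice dungeons (some (ie.1.1 + 1)) none)
        if best < c then c else best
      else best)
    0
termination_by dungeons.length
decreasing_by
  obtain ⟨j, hj, hie⟩ := (PySem.List.mem_enumerate_iff _ _ _).mp ie.2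
  simp only [hie, PySem.List.slice_to dungeons (by omega : (0:Int) ≤ 0 + (j:Int)),
    PySem.List.slice_from dungeons (by omega : (0:Int) ≤ 0 + (j:Int) + 1),
    List.length_append, List.length_take, List.length_drop]
  omega

-- ===== PRECONDITION & SPEC =====
-- Pre_ excludes inputs with a dungeon entry of fewer than 2 ints, except length-1 entries that are
-- trivially never affordable (requirement above k while no cost is negative): on the excluded inputs
-- Python A (and B alike) raises IndexError on d[0]/d[1] as soon as such an entry becomes affordable
-- along some order — a path-dependent condition — so a few inputs on which A happens to return
-- (short entry never reached affordably) are excluded with them.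
def Pre_solution (k : Int) (dungeons : List (List Int)) : Prop :=
  ∀ d ∈ dungeons, 2 ≤ d.length ∨
    (d.length = 1 ∧ k < PySem.List.pyGetD d 0 0 ∧
      ∀ e ∈ dungeons, 2 ≤ e.length → 0 ≤ PySem.List.pyGetD e 1 0)
instance (k : Int) (dungeons : List (List Int)) : Decidable (Pre_solution k dungeons) := by
  unfold Pre_solution; infer_instance
def pvWitness_solution : Int × List (List Int) := (7, [[3, 2], [5, 1]])
def Spec_solution (k : Int) (dungeons : List (List Int)) (out : Int) : Prop := out = solution_alt k dungeons
instance (k : Int) (dungeons : List (List Int)) (out : Int) : Decidable (Spec_solution k dungeons out) := by unfold Spec_solution; infer_instance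

-- ===== CLAIM (what is proved, stated in full; the proofs are below) =====
def Claim_equal_solution : Prop := ∀ (k : Int) (dungeons : List (List Int)), Dom_solution k dungeons → Pre_solution k dungeons → Spec_solution k dungeons (solution k dungeons)

-- ===== LEMMAS AND PROOFS =====

-- the list A's slices build: ds with the element at (valid) position i removed
def pvRest (ds : List (List Int)) (i : Int) : List (List Int) :=
  PySem.List.slice ds none (some i) ++ PySem.List.slice ds (some (i + 1)) none

-- the value B's loop body adds for one enumerate entry
def pvContrib (k : Int) (ds : List (List Int)) (ie : Int × List Int) : Int :=
  if PySem.List.pyGetD ie.2 0 0 ≤ k then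
    1 + solution_alt (k - PySem.List.pyGetD ie.2 1 0) (pvRest ds ie.1)
  else 0

theorem pv_if_max (a c : Int) : (if a < c then c else a) = max a c := by split <;> omega

theorem runA_shift (p : List (List Int)) : ∀ a c, runA a c p = c + runA a 0 p := by
  induction p with
  | nil => intro a c; simp [runA]
  | cons d rest ih =>
    intro a c
    simp only [runA]
    split
    · rw [ih _ (c + 1), ih _ (0 + 1)]; ring
    · omega

theorem runA_nonneg (p : List (List Int)) (a : Int) : 0 ≤ runA a 0 p := by
  cases p with
  | nil => simp [runA]
  | cons d rest =>
    simp only [runA]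
    split
    · rw [runA_shift]; have := runA_nonneg rest (a - PySem.List.pyGetD d 1 0); omega
    · omega

theorem foldl_max_start {X : Type} (f : X → Int) :
    ∀ (l : List X) (a b : Int),
      l.foldl (fun acc x => max acc (f x)) (max a b) =
        max a (l.foldl (fun acc x => max acc (f x)) b) := by
  intro l
  induction l with
  | nil => intro a b; simp
  | cons x xs ih =>
    intro a b
    simp only [List.foldl_cons]
    rw [max_assoc, ih]

theorem foldl_max_base0 {X : Type} (f : X → Int) (x : X) (xs : List X) (hx : 0 ≤ f x) (a : Int) :
    (x :: xs).foldl (fun acc y => max acc (f y)) a =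
      max a ((x :: xs).foldl (fun acc y => max acc (f y)) 0) := by
  simp only [List.foldl_cons]
  rw [show max a (f x) = max a (max 0 (f x)) by omega, foldl_max_start, max_eq_right hx]

theorem foldl_max_shift {X : Type} (f : X → Int) (c : Int) :
    ∀ (l : List X) (b : Int),
      l.foldl (fun acc x => max acc (c + f x)) (c + b) =
        c + l.foldl (fun acc x => max acc (f x)) b := by
  intro l
  induction l with
  | nil => intro b; simp
  | cons x xs ih =>
    intro b
    simp only [List.foldl_cons]
    rw [show max (c + b) (c + f x) = c + max b (f x) from max_add_add_left c b (f x), ih]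

theorem foldl_max_const_zero {X : Type} : ∀ l : List X,
    l.foldl (fun acc (_ : X) => max acc (0 : Int)) 0 = 0 := by
  intro l
  induction l with
  | nil => rfl
  | cons x xs ih => simpa using ih

theorem perm_succ (arr : List (List Int)) (m : Nat) :
    perm arr (m + 1) =
      (PySem.List.enumerate arr).flatMap
        (fun ie => (perm (pvRest arr ie.1) m).map (fun p => ie.2 :: p)) := by
  conv_lhs => rw [perm]
  rw [PySem.List.foldl_append_eq_flatMap]
  rfl

theorem pvRest_zero (x : List Int) (xs : List (List Int)) : pvRest (x :: xs) 0 = xs := by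
  simp [pvRest, PySem.List.slice_to (x :: xs) (le_refl (0:Int)),
    PySem.List.slice_from_one]

theorem pvRest_length (ds : List (List Int)) (j : Nat) (hj : j < ds.length) :
    (pvRest ds ((j : Int))).length = ds.length - 1 := by
  simp only [pvRest, PySem.List.slice_to ds (by omega : (0:Int) ≤ (j:Int)),
    PySem.List.slice_from ds (by omega : (0:Int) ≤ (j:Int) + 1),
    List.length_append, List.length_take, List.length_drop]
  omega

theorem perm_ne_nil : ∀ (m : Nat) (arr : List (List Int)), m ≤ arr.length → perm arr m ≠ [] := by
  intro m
  induction m with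
  | zero => intro arr _; simp [perm]
  | succ m ih =>
    intro arr h
    cases arr with
    | nil => simp at h
    | cons x xs =>
      rw [perm_succ, PySem.List.enumerate_cons]
      simp only [List.flatMap_cons, pvRest_zero]
      have : perm xs m ≠ [] := ih xs (by simpa using h)
      intro hcontra
      rcases List.append_eq_nil_iff.mp hcontra with ⟨h1, _⟩
      exact this (List.map_eq_nil_iff.mp h1)

-- B's recursion as a plain fold of running maxima over enumerate
theorem alt_eq (k : Int) (ds : List (List Int)) :
    solution_alt k ds =
      (PySem.List.enumerate ds).foldl (fun b ie => max b (pvContrib k ds ie)) 0 := by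
  rw [solution_alt]
  rw [List.foldl_attach (l := PySem.List.enumerate ds)
    (f := fun best ie =>
      if PySem.List.pyGetD ie.2 0 0 ≤ k then
        let c := 1 + solution_alt (k - PySem.List.pyGetD ie.2 1 0)
          (PySem.List.slice ds none (some ie.1) ++
           PySem.List.slice ds (some (ie.1 + 1)) none)
        if best < c then c else best
      else best)]
  have aux : ∀ (l : List (Int × List Int)) (b : Int), 0 ≤ b →
      l.foldl (fun best ie =>
        if PySem.List.pyGetD ie.2 0 0 ≤ k then
          let c := 1 + solution_alt (k - PySem.List.pyGetD ie.2 1 0)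
            (PySem.List.slice ds none (some ie.1) ++
             PySem.List.slice ds (some (ie.1 + 1)) none)
          if best < c then c else best
        else best) b =
      l.foldl (fun b ie => max b (pvContrib k ds ie)) b := by
    intro l
    induction l with
    | nil => intro b _; rfl
    | cons ie rest ih =>
      intro b hb
      simp only [List.foldl_cons]
      have hstep : (if PySem.List.pyGetD ie.2 0 0 ≤ k then
          let c := 1 + solution_alt (k - PySem.List.pyGetD ie.2 1 0)
            (PySem.List.slice ds none (some ie.1) ++
             PySem.List.slice ds (some (ie.1 + 1)) none)
          if b < c then c else b
        else b) = max b (pvContrib k ds ie) := by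
        simp only [pvContrib, pvRest]
        split
        · exact pv_if_max b _
        · omega
      rw [hstep]
      exact ih _ (by omega)
  exact aux _ 0 (le_refl 0)

theorem alt_nonneg (k : Int) (ds : List (List Int)) : 0 ≤ solution_alt k ds := by
  rw [alt_eq]
  exact (PySem.List.le_foldl_max_int (PySem.List.enumerate ds) (pvContrib k ds) 0).1

theorem contrib_nonneg (k : Int) (ds : List (List Int)) (ie : Int × List Int) :
    0 ≤ pvContrib k ds ie := by
  unfold pvContrib
  split
  · have := alt_nonneg (k - PySem.List.pyGetD ie.2 1 0) (pvRest ds ie.1); omega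
  · omega

-- the heart of the equivalence: the running max of A's per-permutation counts
-- from any start a equals max a (B's value)
theorem pv_main : ∀ (n : Nat) (ds : List (List Int)), ds.length = n → ∀ (k a : Int),
    (perm ds n).foldl (fun acc p => max acc (runA k 0 p)) a = max a (solution_alt k ds) := by
  intro n
  induction n with
  | zero =>
    intro ds hlen k a
    rw [List.length_eq_zero_iff.mp hlen]
    simp [perm, runA, alt_eq]
  | succ n ih =>
    intro ds hlen k a
    rw [perm_succ, List.foldl_flatMap]
    have hblock : ∀ (acc : Int) (ie : Int × List Int), ie ∈ PySem.List.enumerate ds →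
        ((perm (pvRest ds ie.1) n).map (fun p => ie.2 :: p)).foldl
          (fun acc p => max acc (runA k 0 p)) acc = max acc (pvContrib k ds ie) := by
      intro acc ie hmem
      obtain ⟨j, hj, hie⟩ := (PySem.List.mem_enumerate_iff _ _ _).mp hmem
      have hfst : ie.1 = (j : Int) := by rw [hie]; simp
      have hlenrest : (pvRest ds ie.1).length = n := by
        rw [hfst, pvRest_length ds j hj]; omega
      have hne : perm (pvRest ds ie.1) n ≠ [] := perm_ne_nil n _ (le_of_eq hlenrest.symm)
      obtain ⟨h, t, hht⟩ := List.exists_cons_of_ne_nil hne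
      rw [List.foldl_map]
      simp only [runA]
      by_cases hcond : PySem.List.pyGetD ie.2 0 0 ≤ k
      · simp only [if_pos hcond]
        have hshift : ∀ (p : List (List Int)),
            runA (k - PySem.List.pyGetD ie.2 1 0) (0 + 1) p =
              1 + runA (k - PySem.List.pyGetD ie.2 1 0) 0 p := by
          intro p
          rw [runA_shift p (k - PySem.List.pyGetD ie.2 1 0) (0 + 1)]
          omega
        simp only [hshift]
        rw [hht, foldl_max_base0 (fun p => 1 + runA (k - PySem.List.pyGetD ie.2 1 0) 0 p) h t
          (show (0:Int) ≤ 1 + runA (k - PySem.List.pyGetD ie.2 1 0) 0 h by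
            have := runA_nonneg h (k - PySem.List.pyGetD ie.2 1 0); omega) acc, ← hht]
        have hsh2 := foldl_max_shift (fun p => runA (k - PySem.List.pyGetD ie.2 1 0) 0 p) 1
          (perm (pvRest ds ie.1) n) (-1)
        simp only [] at hsh2
        rw [show (1:Int) + (-1) = 0 by ring] at hsh2
        rw [hsh2]
        rw [ih (pvRest ds ie.1) hlenrest (k - PySem.List.pyGetD ie.2 1 0) (-1)]
        have halt := alt_nonneg (k - PySem.List.pyGetD ie.2 1 0) (pvRest ds ie.1)
        rw [show max (-1) (solution_alt (k - PySem.List.pyGetD ie.2 1 0) (pvRest ds ie.1)) =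
            solution_alt (k - PySem.List.pyGetD ie.2 1 0) (pvRest ds ie.1) by omega]
        simp only [pvContrib, if_pos hcond]
      · simp only [if_neg hcond]
        rw [hht, foldl_max_base0 (fun _ => (0:Int)) h t (le_refl 0) acc, ← hht]
        rw [foldl_max_const_zero]
        simp only [pvContrib, if_neg hcond]
    rw [PySem.List.foldl_congr_mem _ _ _ _ (fun acc ie hmem => hblock acc ie hmem)]
    obtain ⟨x, xs, rfl⟩ : ∃ x xs, ds = x :: xs := by
      cases ds with
      | nil => simp at hlen
      | cons x xs => exact ⟨x, xs, rfl⟩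
    rw [alt_eq, PySem.List.enumerate_cons,
      foldl_max_base0 (pvContrib k (x :: xs)) _ _ (contrib_nonneg k (x :: xs) _) a]

-- ===== VERDICT (by name: the statement is the Claim_ definition above) =====
theorem solution_spec : Claim_equal_solution := by
  intro k dungeons _ _
  unfold Spec_solution solution
  simp only [pv_if_max]
  rw [pv_main dungeons.length dungeons rfl k (-1)]
  have := alt_nonneg k dungeons
  omega
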